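-- pv_equiv track=rewrite | github.com/allanRoberto/revesbot-final | apps/signals/patterns/final1.py | calcular_protecoes
-- ===== SOURCE A (Python) =====
-- from typing import Dict, List, Optional, Set, Tuple, Iterable, Any
-- from typing import List
--
-- WHEEL: List[int] = [
--     0, 32, 15, 19, 4, 21, 2, 25, 17, 34, 6, 27, 13, 36, 11, 30, 8, 23, 10, 5,
--     24, 16, 33, 1, 20, 14, 31, 9, 22, 18, 29, 7, 28, 12, 35, 3, 26
-- ]
--
-- INDEX: Dict[int, int] = {n: i for i, n in enumerate(WHEEL)}
--
-- def vizinhos(n: int) -> Tuple[int, int]: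
--     """Vizinhos na roda (circular)."""
--     i = INDEX[n]
--     left = WHEEL[(i - 1) % len(WHEEL)]
--     right = WHEEL[(i + 1) % len(WHEEL)]
--     return left, right
--
-- STREETS: List[Tuple[int, int, int]] = [(s, s+1, s+2) for s in range(1, 37, 3)]
--
-- ESPELHOS_FIXOS: Dict[int, int] = {
--     1:10, 10:1,
--     2:20, 20:2,
--     3:30, 30:3,
--     6:9,  9:6,
--     11:22, 22:33, 33:11,
--     12:21, 21:12,
--     13:31, 31:13,
--     16:19, 19:16,
--     23:32, 32:23,
--     26:29, 29:26,
-- }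
--
-- def espelho(n: int) -> Optional[int]:
--     return ESPELHOS_FIXOS.get(n)
--
-- def calcular_protecoes(sugestao: Iterable[int]) -> List[int]:
--     """
--     Proteções automáticas:
--       1) Espelhos dos sugeridos.
--       2) "Buracos da roda": se ambos os vizinhos de X estão nos sugeridos, protege X.
--       3) Street faltante: se 2 da mesma rua estão nos sugeridos, protege o 3º.
--       4) Saltos ±2: se (n, n±2) estão, protege (n±1) quando válido.
--     """
--     base: Set[int] = set(int(x) for x in sugestao if 0 <= int(x) <= 36)
--     prot: Set[int] = set()
--
--     # 1) Espelhos
--     for x in base: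
--         e = espelho(x)
--         if e is not None and e not in base:
--             prot.add(e)
--
--     # 2) Buracos da roda
--     # Se ambos vizinhos de X já estão em base, protege X
--     for x in range(37):
--         if x in base:
--             continue
--         vl, vr = vizinhos(x)
--         if vl in base and vr in base:
--             prot.add(x)
--
--     # 3) Street faltante
--     for st in STREETS:
--         sset = set(st)
--         inter = sset & base
--         if len(inter) == 2:
--             missing = list(sset - inter)[0]
--             if missing not in base:
--                 prot.add(missing)
--
--     # 4) Saltos ±2
--     # Considera apenas 1..36 (ignora 0 nesta proteção)
--     b = {x for x in base if x != 0}
--     for x in list(b):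
--         for delta in (-2, 2):
--             y = x + delta
--             if 1 <= y <= 36 and y in b:
--                 mid = x + (delta // 2)
--                 if 1 <= mid <= 36 and mid not in base:
--                     prot.add(mid)
--
--     # Remove números já na base
--     prot.difference_update(base)
--     return sorted(prot, key=lambda n: (n == 0, n))
-- ===== SOURCE B (Python) =====
-- from typing import Iterable, List
--
-- WHEEL: List[int] = [
--     0, 32, 15, 19, 4, 21, 2, 25, 17, 34, 6, 27, 13, 36, 11, 30, 8, 23, 10, 5,
--     24, 16, 33, 1, 20, 14, 31, 9, 22, 18, 29, 7, 28, 12, 35, 3, 26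
-- ]
--
-- ESPELHOS_FIXOS = {
--     1:10, 10:1, 2:20, 20:2, 3:30, 30:3, 6:9, 9:6,
--     11:22, 22:33, 33:11, 12:21, 21:12, 13:31, 31:13,
--     16:19, 19:16, 23:32, 32:23, 26:29, 29:26,
-- }
--
-- # reverse mirror map: REV[c] = x  iff  ESPELHOS_FIXOS[x] = c
-- REV = {v: k for k, v in ESPELHOS_FIXOS.items()}
--
-- INDEX = {n: i for i, n in enumerate(WHEEL)}
--
-- def calcular_protecoes(sugestao: Iterable[int]) -> List[int]:
--     base = set(int(x) for x in sugestao if 0 <= int(x) <= 36)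
--     out: List[int] = []
--     for c in range(37):
--         if c in base:
--             continue
--         # rule 1: c is the mirror of some suggested number
--         m = REV.get(c)
--         rule1 = m is not None and m in base
--         # rule 2: both circular wheel neighbours of c are suggested
--         i = INDEX[c]
--         rule2 = WHEEL[(i - 1) % 37] in base and WHEEL[(i + 1) % 37] in base
--         # rule 3: the two other members of c's street are suggested
--         rule3 = False
--         if c >= 1:
--             s = 3 * ((c - 1) // 3) + 1
--             rule3 = all(t in base for t in (s, s + 1, s + 2) if t != c)
--         # rule 4: c-1 and c+1 are both suggested (0 never participates)
--         rule4 = (c - 1) in base and (c + 1) in base and c - 1 != 0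
--         if rule1 or rule2 or rule3 or rule4:
--             out.append(c)
--     # 0, if protected, sorts last (key (n==0, n))
--     return out[1:] + [0] if out and out[0] == 0 else out
-- ===== Notes on version B (the rewrite author's own statement) =====
-- stated objective: alternative
-- what changed: Replaces A's four separate base-driven loops (mirror scan over the base set, wheel-hole scan, street-intersection scan, plus/minus-2 jump scan over nonzero bases, then set-difference and a keyed sort) with a single candidate-driven pass over 0..36 using a precomputed reverse mirror map, emitting the protections already in output order so no final sort is needed.
import Mathlib
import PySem

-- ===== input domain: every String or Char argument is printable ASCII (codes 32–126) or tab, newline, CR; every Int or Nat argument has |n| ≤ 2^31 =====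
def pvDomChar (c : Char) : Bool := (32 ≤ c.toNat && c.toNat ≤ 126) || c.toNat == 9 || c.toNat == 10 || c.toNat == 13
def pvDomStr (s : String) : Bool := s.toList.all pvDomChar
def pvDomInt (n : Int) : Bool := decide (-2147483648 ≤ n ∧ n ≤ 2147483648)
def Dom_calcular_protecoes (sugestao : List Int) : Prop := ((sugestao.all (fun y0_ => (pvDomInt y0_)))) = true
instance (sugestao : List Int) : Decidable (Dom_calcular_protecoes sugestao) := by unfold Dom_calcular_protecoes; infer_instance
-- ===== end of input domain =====

-- B re-implements the four base-driven protection loops as a single candidate-driven pass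
-- over 0..36 (with a precomputed reverse mirror map), emitting protections already in output order.

-- ===== PORT A =====
-- module constants (shared by both Pythons)
def WHEEL : List Int := [
  0, 32, 15, 19, 4, 21, 2, 25, 17, 34, 6, 27, 13, 36, 11, 30, 8, 23, 10, 5,
  24, 16, 33, 1, 20, 14, 31, 9, 22, 18, 29, 7, 28, 12, 35, 3, 26]

def INDEX : PySem.Dict Int Int :=
  PySem.Dict.ofList ((PySem.List.enumerate WHEEL).map (fun p => (p.2, p.1)))

-- A's vizinhos; INDEX[n] and WHEEL[…] never fail on the inputs used (n ∈ WHEEL, index ∈ 0..36),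
-- so the .getD 0 defaults are never taken.
def vizinhos (n : Int) : Int × Int :=
  let i := (INDEX.get? n).getD 0
  let left := (PySem.List.pyGet? WHEEL (PySem.Int.mod (i - 1) (PySem.List.len WHEEL))).getD 0
  let right := (PySem.List.pyGet? WHEEL (PySem.Int.mod (i + 1) (PySem.List.len WHEEL))).getD 0
  (left, right)

def STREETS : List (Int × Int × Int) :=
  (PySem.List.pyRange 1 37 3).map (fun s => (s, s + 1, s + 2))

def ESPELHOS_FIXOS : PySem.Dict Int Int :=
  PySem.Dict.ofList [(1,10), (10,1), (2,20), (20,2), (3,30), (30,3), (6,9), (9,6),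
    (11,22), (22,33), (33,11), (12,21), (21,12), (13,31), (31,13),
    (16,19), (19,16), (23,32), (32,23), (26,29), (29,26)]

def espelho (n : Int) : Option Int := ESPELHOS_FIXOS.get? n

def calcular_protecoes (sugestao : List Int) : List Int :=
  let base : PySem.Set Int :=
    PySem.Set.ofList (sugestao.filter (fun x => decide (0 ≤ x ∧ x ≤ 36)))
  let prot : PySem.Set Int := PySem.Set.empty
  -- 1) Espelhos
  let prot := base.foldl (fun p x =>
    match espelho x with
    | some e => if e ∈ base then p else PySem.Set.add p e
    | none => p) prot
  -- 2) Buracos da roda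
  let prot := (PySem.List.pyRange 0 37).foldl (fun p x =>
    if x ∈ base then p
    else
      let v := vizinhos x
      if v.1 ∈ base ∧ v.2 ∈ base then PySem.Set.add p x else p) prot
  -- 3) Street faltante
  let prot := STREETS.foldl (fun p st =>
    let sset : PySem.Set Int := PySem.Set.ofList [st.1, st.2.1, st.2.2]
    let inter := PySem.Set.inter sset base
    if PySem.Set.len inter = 2 then
      let missing := (PySem.List.pyGet? (PySem.Set.diff sset inter) 0).getD 0
      if missing ∈ base then p else PySem.Set.add p missing
    else p) prot
  -- 4) Saltos ±2
  let b : PySem.Set Int := PySem.Set.ofList (base.filter (fun x => decide (x ≠ 0)))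
  let prot := b.foldl (fun p x =>
    [(-2 : Int), 2].foldl (fun p delta =>
      let y := x + delta
      if 1 ≤ y ∧ y ≤ 36 ∧ y ∈ b then
        let mid := x + PySem.Int.floordiv delta 2
        if 1 ≤ mid ∧ mid ≤ 36 ∧ mid ∉ base then PySem.Set.add p mid else p
      else p) p) prot
  let prot := PySem.Set.diff prot base
  PySem.List.sorted2 prot (fun n => decide (n = 0)) (fun n => n)

-- ===== PORT B =====
-- reverse mirror map: REV[c] = x iff ESPELHOS_FIXOS[x] = c
def REV : PySem.Dict Int Int :=
  PySem.Dict.ofList (ESPELHOS_FIXOS.items.map (fun p => (p.2, p.1)))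

def calcular_protecoes_alt (sugestao : List Int) : List Int :=
  let base : PySem.Set Int :=
    PySem.Set.ofList (sugestao.filter (fun x => decide (0 ≤ x ∧ x ≤ 36)))
  let out := (PySem.List.pyRange 0 37).foldl (fun acc c =>
    if c ∈ base then acc
    else
      -- rule 1: c is the mirror of some suggested number
      let rule1 := match REV.get? c with
        | some m => decide (m ∈ base)
        | none => false
      -- rule 2: both circular wheel neighbours of c are suggested
      let i := (INDEX.get? c).getD 0
      let rule2 := decide ((PySem.List.pyGet? WHEEL (PySem.Int.mod (i - 1) 37)).getD 0 ∈ base)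
                && decide ((PySem.List.pyGet? WHEEL (PySem.Int.mod (i + 1) 37)).getD 0 ∈ base)
      -- rule 3: the two other members of c's street are suggested
      let rule3 := if 1 ≤ c then
          let s := 3 * PySem.Int.floordiv (c - 1) 3 + 1
          (([s, s + 1, s + 2].filter (fun t => decide (t ≠ c))).all (fun t => decide (t ∈ base)))
        else false
      -- rule 4: c-1 and c+1 are both suggested (0 never participates)
      let rule4 := decide ((c - 1) ∈ base) && decide ((c + 1) ∈ base) && decide (c - 1 ≠ 0)
      if rule1 || rule2 || rule3 || rule4 then acc ++ [c] else acc) []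
  -- 0, if protected, sorts last (key (n==0, n))
  match out with
  | 0 :: rest => rest ++ [0]
  | _ => out

-- ===== PRECONDITION & SPEC =====
def Spec_calcular_protecoes (sugestao : List Int) (out : List Int) : Prop := out = calcular_protecoes_alt sugestao
instance (sugestao : List Int) (out : List Int) : Decidable (Spec_calcular_protecoes sugestao out) := by unfold Spec_calcular_protecoes; infer_instance

-- ===== CLAIM (what is proved, stated in full; the proofs are below) =====
def Claim_equal_calcular_protecoes : Prop := ∀ (sugestao : List Int), Dom_calcular_protecoes sugestao → Spec_calcular_protecoes sugestao (calcular_protecoes sugestao)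

-- ===== LEMMAS AND PROOFS =====

def mirrorPairs : List (Int × Int) :=
  [(1,10), (10,1), (2,20), (20,2), (3,30), (30,3), (6,9), (9,6),
   (11,22), (22,33), (33,11), (12,21), (21,12), (13,31), (31,13),
   (16,19), (19,16), (23,32), (32,23), (26,29), (29,26)]

def pvBase (sugestao : List Int) : PySem.Set Int :=
  PySem.Set.ofList (sugestao.filter (fun x => decide (0 ≤ x ∧ x ≤ 36)))

-- A's protection set as a function of the base set (definitionally the chain inside port A)
def aProt (base : PySem.Set Int) : PySem.Set Int :=
  let prot : PySem.Set Int := PySem.Set.empty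
  let prot := base.foldl (fun p x =>
    match espelho x with
    | some e => if e ∈ base then p else PySem.Set.add p e
    | none => p) prot
  let prot := (PySem.List.pyRange 0 37).foldl (fun p x =>
    if x ∈ base then p
    else
      let v := vizinhos x
      if v.1 ∈ base ∧ v.2 ∈ base then PySem.Set.add p x else p) prot
  let prot := STREETS.foldl (fun p st =>
    let sset : PySem.Set Int := PySem.Set.ofList [st.1, st.2.1, st.2.2]
    let inter := PySem.Set.inter sset base
    if PySem.Set.len inter = 2 then
      let missing := (PySem.List.pyGet? (PySem.Set.diff sset inter) 0).getD 0
      if missing ∈ base then p else PySem.Set.add p missing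
    else p) prot
  let b : PySem.Set Int := PySem.Set.ofList (base.filter (fun x => decide (x ≠ 0)))
  let prot := b.foldl (fun p x =>
    [(-2 : Int), 2].foldl (fun p delta =>
      let y := x + delta
      if 1 ≤ y ∧ y ≤ 36 ∧ y ∈ b then
        let mid := x + PySem.Int.floordiv delta 2
        if 1 ≤ mid ∧ mid ≤ 36 ∧ mid ∉ base then PySem.Set.add p mid else p
      else p) p) prot
  PySem.Set.diff prot base

-- B's per-candidate condition (definitionally the rules inside port B)
def bQ (base : PySem.Set Int) (c : Int) : Bool :=
  !decide (c ∈ base) &&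
    ((match REV.get? c with
      | some m => decide (m ∈ base)
      | none => false) ||
     (decide ((PySem.List.pyGet? WHEEL (PySem.Int.mod ((INDEX.get? c).getD 0 - 1) 37)).getD 0 ∈ base)
       && decide ((PySem.List.pyGet? WHEEL (PySem.Int.mod ((INDEX.get? c).getD 0 + 1) 37)).getD 0 ∈ base)) ||
     (if 1 ≤ c then
        (([3 * PySem.Int.floordiv (c - 1) 3 + 1, 3 * PySem.Int.floordiv (c - 1) 3 + 1 + 1,
           3 * PySem.Int.floordiv (c - 1) 3 + 1 + 2].filter (fun t => decide (t ≠ c))).all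
          (fun t => decide (t ∈ base)))
      else false) ||
     (decide ((c - 1) ∈ base) && decide ((c + 1) ∈ base) && decide (c - 1 ≠ 0)))

def bRot (l : List Int) : List Int :=
  match l with
  | 0 :: rest => rest ++ [0]
  | _ => l

def pkey (c : Int) : Lex (Int × Int) := toLex (if c = 0 then 1 else 0, c)

lemma a_unfold (sugestao : List Int) :
    calcular_protecoes sugestao =
      PySem.List.sorted2 (aProt (pvBase sugestao)) (fun n => decide (n = 0)) (fun n => n) := rfl

lemma b_unfold (sugestao : List Int) :
    calcular_protecoes_alt sugestao =
      bRot ((PySem.List.pyRange 0 37).filter (bQ (pvBase sugestao))) := by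
  show bRot ((PySem.List.pyRange 0 37).foldl _ []) = _
  congr 1
  rw [show (PySem.List.pyRange 0 37).filter (bQ (pvBase sugestao)) =
      [] ++ List.map (fun c => c) ((PySem.List.pyRange 0 37).filter (bQ (pvBase sugestao))) by simp]
  rw [← PySem.List.foldl_append_if (bQ (pvBase sugestao)) (fun c => c) (PySem.List.pyRange 0 37) []]
  apply List.foldl_ext
  intro acc c _
  by_cases hc : c ∈ PySem.Set.ofList (sugestao.filter (fun x => decide (0 ≤ x ∧ x ≤ 36)))
  · simp only [bQ, pvBase, hc, decide_true, Bool.not_true, Bool.false_and,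
      Bool.false_eq_true, if_false]
    simp
  · simp only [bQ, pvBase, hc, decide_false, Bool.not_false, Bool.true_and]
    simp only [if_false]
    rfl

lemma espelho_mem (x e : Int) (h : espelho x = some e) : (x, e) ∈ mirrorPairs := by
  have hm := PySem.Dict.mem_items_of_get?_eq_some ESPELHOS_FIXOS h
  rwa [show ESPELHOS_FIXOS.items = mirrorPairs from by decide] at hm

lemma rev_mem (c m : Int) (h : REV.get? c = some m) : (m, c) ∈ mirrorPairs := by
  have hm := PySem.Dict.mem_items_of_get?_eq_some REV h
  rw [show REV.items = mirrorPairs.map (fun p => (p.2, p.1)) from by decide] at hm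
  fin_cases hm <;> decide

lemma mirror_bridge (x c : Int) : espelho x = some c ↔ REV.get? c = some x := by
  constructor
  · intro h
    have hm := espelho_mem x c h
    fin_cases hm <;> decide
  · intro h
    have hm := rev_mem c x h
    fin_cases hm <;> decide

lemma mirror_bounds (x e : Int) (h : espelho x = some e) : 0 ≤ e ∧ e ≤ 36 := by
  have := espelho_mem x e h
  fin_cases this <;> omega

-- named step functions (definitionally the bodies of A's four loops)
def step1 (S p : PySem.Set Int) (x : Int) : PySem.Set Int :=
  match espelho x with
  | some e => if e ∈ S then p else PySem.Set.add p e
  | none => p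

def step2 (S p : PySem.Set Int) (x : Int) : PySem.Set Int :=
  if x ∈ S then p
  else
    let v := vizinhos x
    if v.1 ∈ S ∧ v.2 ∈ S then PySem.Set.add p x else p

def step3 (S p : PySem.Set Int) (st : Int × Int × Int) : PySem.Set Int :=
  let sset : PySem.Set Int := PySem.Set.ofList [st.1, st.2.1, st.2.2]
  let inter := PySem.Set.inter sset S
  if PySem.Set.len inter = 2 then
    let missing := (PySem.List.pyGet? (PySem.Set.diff sset inter) 0).getD 0
    if missing ∈ S then p else PySem.Set.add p missing
  else p

def step4 (S b p : PySem.Set Int) (x : Int) : PySem.Set Int :=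
  [(-2 : Int), 2].foldl (fun p delta =>
    let y := x + delta
    if 1 ≤ y ∧ y ≤ 36 ∧ y ∈ b then
      let mid := x + PySem.Int.floordiv delta 2
      if 1 ≤ mid ∧ mid ≤ 36 ∧ mid ∉ S then PySem.Set.add p mid else p
    else p) p

def bzero (S : PySem.Set Int) : PySem.Set Int :=
  PySem.Set.ofList (S.filter (fun x => decide (x ≠ 0)))

lemma aProt_eq (S : PySem.Set Int) :
    aProt S = PySem.Set.diff
      ((bzero S).foldl (step4 S (bzero S))
        (STREETS.foldl (step3 S)
          ((PySem.List.pyRange 0 37).foldl (step2 S)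
            (S.foldl (step1 S) PySem.Set.empty)))) S := rfl

lemma h_step1 (S p : PySem.Set Int) (x c : Int) :
    c ∈ step1 S p x ↔ c ∈ p ∨ (espelho x = some c ∧ c ∉ S) := by
  unfold step1
  cases he : espelho x with
  | none => simp
  | some e =>
    by_cases hm : e ∈ S
    · simp only [if_pos hm]
      constructor
      · exact Or.inl
      · rintro (hp | ⟨hec, hcS⟩)
        · exact hp
        · exact absurd hm (by rw [Option.some_inj] at hec; rw [hec]; exact hcS)
    · simp only [if_neg hm, PySem.Set.mem_add, Option.some_inj]
      constructor
      · rintro (hp | rfl)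
        · exact Or.inl hp
        · exact Or.inr ⟨rfl, hm⟩
      · rintro (hp | ⟨rfl, -⟩)
        · exact Or.inl hp
        · exact Or.inr rfl

lemma h_step2 (S p : PySem.Set Int) (x c : Int) :
    c ∈ step2 S p x ↔ c ∈ p ∨ (x ∉ S ∧ (vizinhos x).1 ∈ S ∧ (vizinhos x).2 ∈ S ∧ c = x) := by
  unfold step2
  by_cases hx : x ∈ S
  · simp [hx]
  · simp only [if_neg hx]
    by_cases hv : (vizinhos x).1 ∈ S ∧ (vizinhos x).2 ∈ S
    · simp only [if_pos hv, PySem.Set.mem_add]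
      constructor
      · rintro (hp | rfl)
        · exact Or.inl hp
        · exact Or.inr ⟨hx, hv.1, hv.2, rfl⟩
      · rintro (hp | ⟨-, -, -, rfl⟩)
        · exact Or.inl hp
        · exact Or.inr rfl
    · simp only [if_neg hv]
      constructor
      · exact Or.inl
      · rintro (hp | ⟨-, h1, h2, rfl⟩)
        · exact hp
        · exact absurd ⟨h1, h2⟩ hv

lemma ofList3 (s : Int) : PySem.Set.ofList [s, s+1, s+2] = [s, s+1, s+2] := by
  simp [PySem.Set.ofList, show s+1 ≠ s by omega,
    show s+2 ≠ s by omega, show s+2 ≠ s+1 by omega]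

lemma h_step3 (S p : PySem.Set Int) (s c : Int) :
    c ∈ step3 S p (s, s+1, s+2) ↔
      c ∈ p ∨ ((c = s ∨ c = s+1 ∨ c = s+2) ∧ c ∉ S ∧ ∀ t ∈ [s, s+1, s+2], t ≠ c → t ∈ S) := by
  unfold step3
  simp only [ofList3]
  by_cases h1 : s ∈ S <;> by_cases h2 : s+1 ∈ S <;> by_cases h3 : s+2 ∈ S <;>
    simp [PySem.Set.inter, PySem.Set.diff, PySem.Set.len, h1, h2, h3, PySem.Set.mem_add] <;>
    first
      | (rintro (rfl | rfl | rfl) <;> simp_all)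
      | (constructor
         · rintro (hp | rfl) <;> simp_all
         · rintro (hp | h) <;> simp_all)

set_option maxHeartbeats 1000000 in
lemma h_step4 (S b p : PySem.Set Int) (x c : Int) :
    c ∈ step4 S b p x ↔ c ∈ p ∨
      ((1 ≤ x - 2 ∧ x - 2 ≤ 36 ∧ x - 2 ∈ b) ∧ (1 ≤ x - 1 ∧ x - 1 ≤ 36 ∧ x - 1 ∉ S) ∧ c = x - 1) ∨
      ((1 ≤ x + 2 ∧ x + 2 ≤ 36 ∧ x + 2 ∈ b) ∧ (1 ≤ x + 1 ∧ x + 1 ≤ 36 ∧ x + 1 ∉ S) ∧ c = x + 1) := by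
  unfold step4
  have e1 : x + (-2 : Int) = x - 2 := by ring
  have e2 : x + PySem.Int.floordiv (-2) 2 = x - 1 := by
    rw [show PySem.Int.floordiv (-2) 2 = -1 from by decide]; ring
  have e3 : x + PySem.Int.floordiv 2 2 = x + 1 := by
    rw [show PySem.Int.floordiv 2 2 = 1 from by decide]
  simp only [List.foldl_cons, List.foldl_nil, e1, e2, e3]
  split_ifs <;> (try simp only [PySem.Set.mem_add]) <;> tauto

lemma mem_foldl_of_step {alpha : Type} (step : PySem.Set Int → alpha → PySem.Set Int)
    (Q : alpha → Int → Prop) (h : ∀ p x c, c ∈ step p x ↔ c ∈ p ∨ Q x c) :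
    ∀ (l : List alpha) (p0 : PySem.Set Int) (c : Int),
      c ∈ l.foldl step p0 ↔ c ∈ p0 ∨ ∃ x ∈ l, Q x c := by
  intro l
  induction l with
  | nil => simp
  | cons a t ih =>
    intro p0 c
    simp only [List.foldl_cons, ih, h, List.mem_cons]
    constructor
    · rintro ((hp | hq) | ⟨x, hx, hq⟩)
      · exact Or.inl hp
      · exact Or.inr ⟨a, Or.inl rfl, hq⟩
      · exact Or.inr ⟨x, Or.inr hx, hq⟩
    · rintro (hp | ⟨x, (rfl | hx), hq⟩)
      · exact Or.inl (Or.inl hp)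
      · exact Or.inl (Or.inr hq)
      · exact Or.inr ⟨x, hx, hq⟩

lemma nodup_foldl_of_step {alpha : Type} (step : PySem.Set Int → alpha → PySem.Set Int)
    (h : ∀ p x, p.Nodup → (step p x).Nodup) :
    ∀ (l : List alpha) (p0 : PySem.Set Int), p0.Nodup → (l.foldl step p0).Nodup := by
  intro l
  induction l with
  | nil => exact fun p0 hp => hp
  | cons a t ih => exact fun p0 hp => ih _ (h p0 a hp)

lemma mem_bzero (S : PySem.Set Int) (y : Int) : y ∈ bzero S ↔ y ∈ S ∧ y ≠ 0 := by
  simp [bzero, PySem.Set.mem_ofList, List.mem_filter]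

lemma vizinhos_eq (n : Int) :
    vizinhos n =
      ((PySem.List.pyGet? WHEEL (PySem.Int.mod ((INDEX.get? n).getD 0 - 1) 37)).getD 0,
       (PySem.List.pyGet? WHEEL (PySem.Int.mod ((INDEX.get? n).getD 0 + 1) 37)).getD 0) := by
  unfold vizinhos
  rw [show PySem.List.len WHEEL = (37 : Int) from by decide]

set_option maxRecDepth 4096 in
lemma bQ_iff (S : PySem.Set Int) (c : Int) :
    bQ S c = true ↔ c ∉ S ∧
      ((∃ m, REV.get? c = some m ∧ m ∈ S) ∨
       ((vizinhos c).1 ∈ S ∧ (vizinhos c).2 ∈ S) ∨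
       (1 ≤ c ∧ (3 * PySem.Int.floordiv (c - 1) 3 + 1 = c ∨ 3 * PySem.Int.floordiv (c - 1) 3 + 1 ∈ S) ∧
         (3 * PySem.Int.floordiv (c - 1) 3 + 1 + 1 = c ∨ 3 * PySem.Int.floordiv (c - 1) 3 + 1 + 1 ∈ S) ∧
         (3 * PySem.Int.floordiv (c - 1) 3 + 1 + 2 = c ∨ 3 * PySem.Int.floordiv (c - 1) 3 + 1 + 2 ∈ S)) ∨
       ((c - 1) ∈ S ∧ (c + 1) ∈ S ∧ c - 1 ≠ 0)) := by
  rw [vizinhos_eq]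
  cases hrev : REV.get? c with
  | none =>
    by_cases h1 : (1 : Int) ≤ c <;>
      (simp [bQ, hrev, h1, and_assoc]; try (intro _; simp only [or_assoc]))
  | some m =>
    by_cases h1 : (1 : Int) ≤ c <;>
      (simp [bQ, hrev, h1, and_assoc]; try (intro _; simp only [or_assoc]))

lemma mem_aProt_raw (S : PySem.Set Int) (c : Int) :
    c ∈ aProt S ↔
      ((∃ x ∈ S, espelho x = some c ∧ c ∉ S) ∨
       (∃ x ∈ PySem.List.pyRange 0 37, x ∉ S ∧ (vizinhos x).1 ∈ S ∧ (vizinhos x).2 ∈ S ∧ c = x) ∨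
       (∃ s ∈ PySem.List.pyRange 1 37 3,
          (c = s ∨ c = s + 1 ∨ c = s + 2) ∧ c ∉ S ∧ ∀ t ∈ [s, s + 1, s + 2], t ≠ c → t ∈ S) ∨
       (∃ x ∈ bzero S,
          ((1 ≤ x - 2 ∧ x - 2 ≤ 36 ∧ x - 2 ∈ bzero S) ∧ (1 ≤ x - 1 ∧ x - 1 ≤ 36 ∧ x - 1 ∉ S) ∧ c = x - 1) ∨
          ((1 ≤ x + 2 ∧ x + 2 ≤ 36 ∧ x + 2 ∈ bzero S) ∧ (1 ≤ x + 1 ∧ x + 1 ≤ 36 ∧ x + 1 ∉ S) ∧ c = x + 1)))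
      ∧ c ∉ S := by
  rw [aProt_eq, PySem.Set.mem_diff]
  rw [show STREETS = (PySem.List.pyRange 1 37 3).map (fun s => (s, s + 1, s + 2)) from rfl,
    List.foldl_map]
  rw [mem_foldl_of_step _ _ (h_step4 S (bzero S)),
    mem_foldl_of_step _ (fun s c => (c = s ∨ c = s + 1 ∨ c = s + 2) ∧ c ∉ S ∧
      ∀ t ∈ [s, s + 1, s + 2], t ≠ c → t ∈ S) (fun p s c => h_step3 S p s c),
    mem_foldl_of_step _ _ (h_step2 S),
    mem_foldl_of_step _ _ (h_step1 S)]
  have : (c ∈ PySem.Set.empty) = False := by simp [PySem.Set.empty]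
  rw [this]
  simp only [false_or, or_assoc]

lemma mem_aProt (S : PySem.Set Int) (hbd : ∀ x ∈ S, 0 ≤ x ∧ x ≤ 36) (c : Int) :
    c ∈ aProt S ↔ c ∈ PySem.List.pyRange 0 37 ∧ bQ S c = true := by
  have hfd : PySem.Int.floordiv (c - 1) 3 = (c - 1) / 3 :=
    PySem.Int.floordiv_eq_ediv_of_pos (by norm_num)
  rw [mem_aProt_raw, bQ_iff, PySem.List.mem_pyRange_one, hfd]
  constructor
  · rintro ⟨h, hcS⟩
    rcases h with ⟨x, hxS, hesp, -⟩ | ⟨x, hxR, hxnS, hv1, hv2, rfl⟩ |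
      ⟨s, hsR, hcs, -, hall⟩ | ⟨x, hxb, hq⟩
    · have hb := mirror_bounds x c hesp
      exact ⟨⟨hb.1, by omega⟩, hcS, Or.inl ⟨x, (mirror_bridge x c).1 hesp, hxS⟩⟩
    · have hb := PySem.List.mem_pyRange_one.1 hxR
      exact ⟨hb, hcS, Or.inr (Or.inl ⟨hv1, hv2⟩)⟩
    · have hb := (PySem.List.mem_pyRange_iff_of_pos (by norm_num) s).1 hsR
      obtain ⟨hs1, hs2, hs3⟩ := hb
      have hseq : s = 3 * ((c - 1) / 3) + 1 := by omega
      refine ⟨⟨by omega, by omega⟩, hcS, Or.inr (Or.inr (Or.inl ?_))⟩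
      rw [← hseq]
      refine ⟨by omega, ?_, ?_, ?_⟩
      · by_cases he : s = c
        · exact Or.inl he
        · exact Or.inr (hall s (by simp) he)
      · by_cases he : s + 1 = c
        · exact Or.inl he
        · exact Or.inr (hall (s + 1) (by simp) he)
      · by_cases he : s + 2 = c
        · exact Or.inl he
        · exact Or.inr (hall (s + 2) (by simp) he)
    · have hxS := (mem_bzero S x).1 hxb
      rcases hq with ⟨⟨ha1, ha2, ha3⟩, ⟨hb1, hb2, hb3⟩, rfl⟩ | ⟨⟨ha1, ha2, ha3⟩, ⟨hb1, hb2, hb3⟩, rfl⟩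
      · have h2 := (mem_bzero S (x - 2)).1 ha3
        refine ⟨⟨by omega, by omega⟩, hb3, Or.inr (Or.inr (Or.inr ⟨?_, ?_, ?_⟩))⟩
        · rw [show x - 1 - 1 = x - 2 by ring]; exact h2.1
        · rw [show x - 1 + 1 = x by ring]; exact hxS.1
        · rw [show x - 1 - 1 = x - 2 by ring]; exact h2.2
      · have h2 := (mem_bzero S (x + 2)).1 ha3
        refine ⟨⟨by omega, by omega⟩, hb3, Or.inr (Or.inr (Or.inr ⟨?_, ?_, ?_⟩))⟩
        · rw [show x + 1 - 1 = x by ring]; exact hxS.1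
        · rw [show x + 1 + 1 = x + 2 by ring]; exact h2.1
        · rw [show x + 1 - 1 = x by ring]; exact hxS.2
  · rintro ⟨⟨h0, h37⟩, hcS, hr⟩
    refine ⟨?_, hcS⟩
    rcases hr with ⟨m, hrev, hmS⟩ | ⟨hv1, hv2⟩ | ⟨h1c, ht1, ht2, ht3⟩ | ⟨hm1, hp1, hne⟩
    · exact Or.inl ⟨m, hmS, (mirror_bridge m c).2 hrev, hcS⟩
    · exact Or.inr (Or.inl ⟨c, PySem.List.mem_pyRange_one.2 ⟨h0, h37⟩, hcS, hv1, hv2, rfl⟩)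
    · refine Or.inr (Or.inr (Or.inl ⟨3 * ((c - 1) / 3) + 1,
        (PySem.List.mem_pyRange_iff_of_pos (by norm_num) _).2 ⟨by omega, by omega, by omega⟩,
        by omega, hcS, ?_⟩))
      intro t htm htne
      fin_cases htm
      · exact ht1.resolve_left htne
      · exact ht2.resolve_left htne
      · exact ht3.resolve_left htne
    · have hbd1 := hbd _ hm1
      have hbd2 := hbd _ hp1
      refine Or.inr (Or.inr (Or.inr ⟨c + 1, (mem_bzero S (c + 1)).2 ⟨hp1, by omega⟩,
        Or.inl ⟨⟨by omega, by omega, ?_⟩, ⟨by omega, by omega, ?_⟩, by ring⟩⟩))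
      · rw [show c + 1 - 2 = c - 1 by ring]
        exact (mem_bzero S (c - 1)).2 ⟨hm1, hne⟩
      · rw [show c + 1 - 1 = c by ring]
        exact hcS

lemma nodup_aProt (S : PySem.Set Int) : (aProt S).Nodup := by
  rw [aProt_eq]
  refine PySem.Set.nodup_diff _ _ ?_
  refine nodup_foldl_of_step _ ?_ _ _
    (nodup_foldl_of_step _ ?_ _ _
      (nodup_foldl_of_step _ ?_ _ _
        (nodup_foldl_of_step _ ?_ _ _ (by simp [PySem.Set.empty]))))
  · intro p x hp
    unfold step4
    simp only [List.foldl_cons, List.foldl_nil]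
    split_ifs <;>
      first
        | exact hp
        | exact PySem.Set.nodup_add _ _ hp
        | exact PySem.Set.nodup_add _ _ (PySem.Set.nodup_add _ _ hp)
  · intro p st hp
    unfold step3
    dsimp only
    split_ifs <;> first | exact hp | exact PySem.Set.nodup_add _ _ hp
  · intro p x hp
    unfold step2
    dsimp only
    split_ifs <;> first | exact hp | exact PySem.Set.nodup_add _ _ hp
  · intro p x hp
    unfold step1
    cases espelho x with
    | none => exact hp
    | some e =>
      dsimp only
      split_ifs <;> first | exact hp | exact PySem.Set.nodup_add _ _ hp

lemma pkey_cmp (a b : Int) :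
    (decide ((decide (a = 0)) < (decide (b = 0))) ||
      (!decide ((decide (b = 0)) < (decide (a = 0))) && decide (a < b))) =
    decide (pkey a < pkey b) := by
  by_cases ha : a = 0 <;> by_cases hb : b = 0 <;>
    simp [pkey, ha, hb, Prod.Lex.toLex_lt_toLex]

lemma sorted2_eq_sorted_pkey (xs : List Int) :
    PySem.List.sorted2 xs (fun n => decide (n = 0)) (fun n => n) =
      PySem.List.sorted xs pkey := by
  have h : (fun (a b : Int) => decide ((decide (a = 0)) < (decide (b = 0))) ||
      (!decide ((decide (b = 0)) < (decide (a = 0))) && decide (a < b))) =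
      (fun (a b : Int) => decide (pkey a < pkey b)) :=
    funext fun a => funext fun b => pkey_cmp a b
  unfold PySem.List.sorted2 PySem.List.sorted
  dsimp only
  rw [h]
  simp only [show (false = true) = False from by simp, if_false]

lemma bRot_perm (l : List Int) : (bRot l).Perm l := by
  unfold bRot
  split
  · exact List.perm_append_singleton _ _
  · exact List.Perm.refl _

lemma final_sort (S : PySem.Set Int) (hbd : ∀ x ∈ S, 0 ≤ x ∧ x ≤ 36) :
    PySem.List.sorted2 (aProt S) (fun n => decide (n = 0)) (fun n => n) =
      bRot ((PySem.List.pyRange 0 37).filter (bQ S)) := by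
  rw [sorted2_eq_sorted_pkey]
  set L := (PySem.List.pyRange 0 37).filter (bQ S) with hL
  have hRnd : (PySem.List.pyRange 0 37).Nodup := by decide
  have hRpw : (PySem.List.pyRange 0 37).Pairwise (· < ·) := by decide
  have hLnd : L.Nodup := hRnd.filter _
  have hLpw : L.Pairwise (· < ·) := hRpw.filter _
  have hLpos : ∀ x ∈ L, 0 ≤ x := fun x hx => by
    have hm := (List.mem_filter.1 hx).1
    exact (PySem.List.mem_pyRange_one.1 hm).1
  have hmem : ∀ a, a ∈ L ↔ a ∈ aProt S := fun a => by
    rw [hL, List.mem_filter, mem_aProt S hbd a]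
  clear_value L
  have key_pos : ∀ a b : Int, 0 < a → 0 < b → a < b → pkey a < pkey b := by
    intro a b ha hb hab
    simp [pkey, show a ≠ 0 by omega, show b ≠ 0 by omega, Prod.Lex.toLex_lt_toLex, hab]
  apply PySem.List.sorted_eq_of_perm_of_pairwise_lt
  · exact (bRot_perm L).trans ((List.perm_ext_iff_of_nodup hLnd (nodup_aProt S)).2 hmem)
  · unfold bRot
    split
    · rename_i _ rest
      rw [List.pairwise_cons] at hLpw
      obtain ⟨h0, hrest⟩ := hLpw
      rw [List.pairwise_append]
      refine ⟨hrest.imp_of_mem ?_, by simp, ?_⟩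
      · intro a b ha hb hab
        exact key_pos a b (h0 a ha) (h0 b hb) hab
      · intro a ha b hb
        rw [List.mem_singleton] at hb
        subst hb
        have hapos := h0 a ha
        simp [pkey, show a ≠ 0 by omega, Prod.Lex.toLex_lt_toLex]
    · rename_i hne
      have hpos : ∀ x ∈ L, 0 < x := by
        intro x hx
        rcases (hLpos x hx).lt_or_eq with h | h
        · exact h
        · exfalso
          cases hcase : L with
          | nil => rw [hcase] at hx; simp at hx
          | cons y t =>
            rw [hcase] at hx hLpw hLpos
            rcases List.mem_cons.1 hx with rfl | hxt
            · exact hne _ (by rw [hcase, ← h])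
            · have := (List.pairwise_cons.1 hLpw).1 _ hxt
              have := hLpos y (by simp)
              omega
      exact hLpw.imp_of_mem (fun {a b} ha hb hab => key_pos a b (hpos a ha) (hpos b hb) hab)

-- ===== VERDICT (by name: the statement is the Claim_ definition above) =====
theorem calcular_protecoes_spec : Claim_equal_calcular_protecoes := by
  intro sugestao _
  unfold Spec_calcular_protecoes
  rw [a_unfold, b_unfold]
  exact final_sort (pvBase sugestao)
    (fun x hx => by
      have hx' := (PySem.Set.mem_ofList _ x).1 hx
      have hb := (List.mem_filter.1 hx').2
      simpa using of_decide_eq_true hb)
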